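-- pv_equiv track=rewrite | github.com/alejotherrera/AED | Practica Final/P11/principal.py | analisis_cadena
-- ===== SOURCE A (Python) =====
-- def analisis_cadena(cadena):
--     hay_t = hay_tb = False
--     cont = pal = 0
--     for i in cadena:
--         if i == " " or i == ".":
--             if hay_tb and cont > 4:
--                 pal += 1
--             # Reiniciar banderas
--             cont = 0
--             hay_tb = hay_t = False
--         else:
--             cont += 1
--             if i == "t" and not hay_t:
--                 hay_t = True
--             if hay_t and i == "b":
--                 hay_tb = True
--     return pal
-- ===== SOURCE B (Python) =====
-- def analisis_cadena(cadena):
--     # Tokenize once (treat '.' like ' '), then test each delimiter-terminated word.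
--     tokens = cadena.replace('.', ' ').split(' ')
--     pal = 0
--     for w in tokens[:-1]:
--         ti = w.find('t')
--         if len(w) > 4 and ti != -1 and 'b' in w[ti + 1:]:
--             pal += 1
--     return pal
-- ===== Notes on version B (the rewrite author's own statement) =====
-- stated objective: simpler
-- what changed: Replaces the single-pass four-variable flag state machine with tokenize-once (replace '.' with ' ', split on ' '), then a per-word test ('b' after the first 't' and length > 4) over all delimiter-terminated tokens (tokens[:-1]).
import Mathlib
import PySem

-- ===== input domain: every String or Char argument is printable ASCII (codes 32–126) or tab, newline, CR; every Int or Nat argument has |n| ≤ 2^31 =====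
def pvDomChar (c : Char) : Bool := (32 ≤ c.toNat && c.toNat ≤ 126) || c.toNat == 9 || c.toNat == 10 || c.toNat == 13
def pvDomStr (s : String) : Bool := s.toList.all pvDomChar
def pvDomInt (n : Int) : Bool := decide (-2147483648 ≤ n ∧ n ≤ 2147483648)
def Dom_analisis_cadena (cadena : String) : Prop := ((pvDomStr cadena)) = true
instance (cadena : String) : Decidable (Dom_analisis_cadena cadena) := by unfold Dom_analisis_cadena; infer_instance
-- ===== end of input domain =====

-- B replaces A's single-pass flag state machine by tokenize-once-then-test-each-word (same values; objective: simpler decomposition).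

-- ===== PORT A =====
-- state: (hay_t, hay_tb, cont, pal), exactly A's loop over the characters
def analisis_cadena (cadena : String) : Int :=
  (cadena.toList.foldl
    (fun (st : Bool × Bool × Int × Int) i =>
      let hay_t := st.1
      let hay_tb := st.2.1
      let cont := st.2.2.1
      let pal := st.2.2.2
      if i = ' ' ∨ i = '.' then
        (false, false, 0, if hay_tb = true ∧ cont > 4 then pal + 1 else pal)
      else
        let cont := cont + 1
        let hay_t := if i = 't' ∧ hay_t = false then true else hay_t
        let hay_tb := if hay_t = true ∧ i = 'b' then true else hay_tb
        (hay_t, hay_tb, cont, pal))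
    (false, false, 0, 0)).2.2.2

-- ===== PORT B =====
-- tokens = cadena.replace('.', ' ').split(' '); count w in tokens[:-1] with len(w) > 4 and a 'b' after the first 't'
-- (.getD [] only discharges split?'s none case, which needs sep = "" and is unreachable for sep = " ")
def analisis_cadena_alt (cadena : String) : Int :=
  let tokens := (PySem.Str.split? (PySem.Str.replace cadena "." " ") " ").getD []
  (PySem.List.slice tokens none (some (-1))).foldl
    (fun pal w =>
      let ti := PySem.Str.find w "t"
      if 4 < PySem.Str.len w ∧ ti ≠ -1 ∧ PySem.Str.isIn "b" (PySem.Str.slice w (some (ti + 1)) none) = true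
      then pal + 1 else pal)
    0

-- ===== PRECONDITION & SPEC =====
def Spec_analisis_cadena (cadena : String) (out : Int) : Prop := out = analisis_cadena_alt cadena
instance (cadena : String) (out : Int) : Decidable (Spec_analisis_cadena cadena out) := by unfold Spec_analisis_cadena; infer_instance

-- ===== CLAIM (what is proved, stated in full; the proofs are below) =====
def Claim_equal_analisis_cadena : Prop := ∀ (cadena : String), Dom_analisis_cadena cadena → Spec_analisis_cadena cadena (analisis_cadena cadena)

-- ===== LEMMAS AND PROOFS =====

-- A's loop body, named so the invariant lemma can speak about it (definitionally A's inline lambda)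
def pvStepA (st : Bool × Bool × Int × Int) (i : Char) : Bool × Bool × Int × Int :=
  let hay_t := st.1
  let hay_tb := st.2.1
  let cont := st.2.2.1
  let pal := st.2.2.2
  if i = ' ' ∨ i = '.' then
    (false, false, 0, if hay_tb = true ∧ cont > 4 then pal + 1 else pal)
  else
    let cont := cont + 1
    let hay_t := if i = 't' ∧ hay_t = false then true else hay_t
    let hay_tb := if hay_t = true ∧ i = 'b' then true else hay_tb
    (hay_t, hay_tb, cont, pal)

-- the substitution performed by cadena.replace('.', ' ')
def pvSub (c : Char) : Char := if c = '.' then ' ' else c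

-- split at ' ' only (what .split(' ') does), with the current word as accumulator
def pvSplit1 (w : List Char) : List Char → List (List Char)
  | [] => [w]
  | c :: rest => if c = ' ' then w :: pvSplit1 [] rest else pvSplit1 (w ++ [c]) rest

-- split at ' ' or '.' (what A's loop effectively does)
def pvSplit (w : List Char) : List Char → List (List Char)
  | [] => [w]
  | c :: rest => if c = ' ' ∨ c = '.' then w :: pvSplit [] rest else pvSplit (w ++ [c]) rest

-- "a 'b' occurs strictly after the first 't'"
def pvHasTB : List Char → Bool
  | [] => false
  | c :: rest => if c = 't' then rest.contains 'b' else pvHasTB rest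

theorem pvReplaceGo (l : List Char) : ∀ (fuel : Nat) (acc : List Char), l.length ≤ fuel →
    PySem.Chars.replace.go ['.'] [' '] fuel l acc = acc.reverse ++ l.map pvSub := by
  induction l with
  | nil =>
    intro fuel acc _
    cases fuel <;> (rw [PySem.Chars.replace.go]; simp) <;> omega
  | cons c t ih =>
    intro fuel acc h
    cases fuel with
    | zero => simp at h
    | succ fuel =>
      by_cases hc : c = '.'
      · subst hc
        have hg := ih fuel (' ' :: acc) (by simpa using h)
        rw [PySem.Chars.replace.go]
        simp [List.isPrefixOf, hg, pvSub]
      · have hg := ih fuel (c :: acc) (by simpa using h)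
        rw [PySem.Chars.replace.go]
        simp [List.isPrefixOf, Ne.symm hc, hg, pvSub, hc]

theorem pvReplaceEq (cs : List Char) : PySem.Chars.replace cs ['.'] [' '] = cs.map pvSub := by
  unfold PySem.Chars.replace
  rw [if_neg (by simp)]
  simpa using pvReplaceGo cs cs.length [] le_rfl

theorem pvSplitGo (l : List Char) : ∀ (fuel : Nat) (cur : List Char) (acc : List (List Char)), l.length ≤ fuel →
    PySem.Chars.splitOn.go [' '] fuel l cur acc = acc.reverse ++ pvSplit1 cur.reverse l := by
  induction l with
  | nil =>
    intro fuel cur acc _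
    cases fuel <;> (rw [PySem.Chars.splitOn.go]; simp [pvSplit1]) <;> omega
  | cons c t ih =>
    intro fuel cur acc h
    cases fuel with
    | zero => simp at h
    | succ fuel =>
      by_cases hc : c = ' '
      · subst hc
        have hg := ih fuel [] (cur.reverse :: acc) (by simpa using h)
        rw [PySem.Chars.splitOn.go]
        simp [List.isPrefixOf, hg, pvSplit1]
      · have hg := ih fuel (c :: cur) acc (by simpa using h)
        rw [PySem.Chars.splitOn.go]
        simp [List.isPrefixOf, Ne.symm hc, hg, pvSplit1, hc]

theorem pvSplit1_map (l : List Char) : ∀ w : List Char, pvSplit1 w (l.map pvSub) = pvSplit w l := by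
  induction l with
  | nil => intro w; simp [pvSplit1, pvSplit]
  | cons c t ih =>
    intro w
    by_cases hc : c = ' ' ∨ c = '.'
    · have hsub : pvSub c = ' ' := by
        rcases hc with hc | hc <;> simp [pvSub, hc]
      simp [pvSplit1, pvSplit, hsub, hc, ih]
    · push_neg at hc
      have hsub : pvSub c = c := by simp [pvSub, hc.2]
      simp [pvSplit1, pvSplit, hsub, hc.1, hc, ih]

theorem pvSplit_ne_nil (l : List Char) : ∀ w : List Char, pvSplit w l ≠ [] := by
  induction l with
  | nil => intro w; simp [pvSplit]
  | cons c t ih =>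
    intro w
    by_cases hc : c = ' ' ∨ c = '.' <;> simp [pvSplit, hc, ih]

theorem pvHasTB_append (w : List Char) (c : Char) :
    pvHasTB (w ++ [c]) = (pvHasTB w || (w.contains 't' && c == 'b')) := by
  induction w with
  | nil =>
    by_cases hc : c = 't' <;> simp [pvHasTB, hc]
  | cons x xs ih =>
    by_cases hx : x = 't'
    · subst hx; simp [pvHasTB, eq_comm, Bool.beq_eq_decide_eq]
    · simp [pvHasTB, hx, ih, Ne.symm hx]

theorem pvHasTB_of_not_mem (w : List Char) (h : 't' ∉ w) : pvHasTB w = false := by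
  induction w with
  | nil => rfl
  | cons x xs ih =>
    simp only [List.mem_cons, not_or] at h
    simp [pvHasTB, Ne.symm h.1, ih h.2]

theorem pvHasTB_drop (u : List Char) : ∀ k : Nat, ['t'] <+: u.drop k → (∀ i < k, ¬ ['t'] <+: u.drop i) →
    (pvHasTB u = true ↔ 'b' ∈ u.drop (k + 1)) := by
  induction u with
  | nil => intro k h1 _; simp at h1
  | cons c rest ih =>
    intro k h1 h2
    cases k with
    | zero =>
      simp only [List.drop_zero] at h1
      rw [List.cons_prefix_cons] at h1
      rw [h1.1.symm]
      simp [pvHasTB, List.contains_iff_mem]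
    | succ k =>
      have hc : c ≠ 't' := by
        intro hc; subst hc
        exact h2 0 (Nat.succ_pos k) (by simp [List.cons_prefix_cons])
      rw [show List.drop (k+1) (c :: rest) = List.drop k rest from rfl] at h1
      have h2' : ∀ i < k, ¬ ['t'] <+: rest.drop i := by
        intro i hi
        have := h2 (i+1) (by omega)
        simpa using this
      have := ih k h1 h2'
      simpa [pvHasTB, hc] using this

-- B's per-word test equals the condition A's flags measure
theorem pvGood (u : List Char) :
    ((4:Int) < (u.length : Int) ∧ PySem.Chars.find u ['t'] ≠ -1 ∧
      PySem.Chars.isIn ['b'] (PySem.List.slice u (some (PySem.Chars.find u ['t'] + 1)) none) = true)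
    ↔ (4 < u.length ∧ pvHasTB u = true) := by
  by_cases hm : 't' ∈ u
  · have h0 : 0 ≤ PySem.Chars.find u ['t'] :=
      (PySem.Chars.find_nonneg_iff u ['t']).2 ((List.singleton_infix_iff 't' u).2 hm)
    obtain ⟨hpre, hmin⟩ := PySem.Chars.find_spec h0
    have hne : PySem.Chars.find u ['t'] ≠ -1 := by omega
    have hslice : PySem.List.slice u (some (PySem.Chars.find u ['t'] + 1)) none
        = u.drop (PySem.Chars.find u ['t'] + 1).toNat :=
      PySem.List.slice_from u (by omega)
    have htn : (PySem.Chars.find u ['t'] + 1).toNat = (PySem.Chars.find u ['t']).toNat + 1 := by omega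
    have hdrop := pvHasTB_drop u (PySem.Chars.find u ['t']).toNat hpre hmin
    rw [hslice, htn]
    simp only [PySem.Chars.isIn_iff_infix, List.singleton_infix_iff]
    constructor
    · rintro ⟨h1, _, h3⟩; exact ⟨by exact_mod_cast h1, hdrop.2 h3⟩
    · rintro ⟨h1, h2⟩; exact ⟨by exact_mod_cast h1, hne, hdrop.1 h2⟩
  · have hf : PySem.Chars.find u ['t'] = -1 :=
      (PySem.Chars.find_eq_neg_one_iff u ['t']).2 (by simpa [List.singleton_infix_iff] using hm)
    simp [hf, pvHasTB_of_not_mem u hm]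

-- the loop invariant: A's state after a word prefix w, then the rest cs
theorem pvMain (cs : List Char) : ∀ (w : List Char) (pal : Int),
    (cs.foldl pvStepA (w.contains 't', pvHasTB w, (w.length : Int), pal)).2.2.2
      = ((pvSplit w cs).dropLast).foldl
          (fun p u => if 4 < u.length ∧ pvHasTB u = true then p + 1 else p) pal := by
  induction cs with
  | nil => intro w pal; simp [pvSplit]
  | cons c rest ih =>
    intro w pal
    by_cases hc : c = ' ' ∨ c = '.'
    · have hcond : (pvHasTB w = true ∧ ((w.length : Int)) > 4) ↔ (4 < w.length ∧ pvHasTB w = true) := by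
        constructor
        · rintro ⟨a, b⟩; exact ⟨by exact_mod_cast b, a⟩
        · rintro ⟨a, b⟩; exact ⟨b, by exact_mod_cast a⟩
      have hstep : pvStepA (w.contains 't', pvHasTB w, (w.length : Int), pal) c
          = (false, false, 0, if 4 < w.length ∧ pvHasTB w = true then pal + 1 else pal) := by
        simp only [pvStepA, if_pos hc]
        rw [if_congr hcond rfl rfl]
      rw [List.foldl_cons, hstep]
      have h0 := ih [] (if 4 < w.length ∧ pvHasTB w = true then pal + 1 else pal)
      simp only [List.contains_nil, pvHasTB, List.length_nil, Nat.cast_zero] at h0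
      rw [h0]
      rw [show pvSplit w (c :: rest) = w :: pvSplit [] rest from by simp [pvSplit, hc]]
      rw [List.dropLast_cons_of_ne_nil (pvSplit_ne_nil rest [])]
      simp [List.foldl_cons]
    · push_neg at hc
      have h1 : (if c = 't' ∧ (w.contains 't') = false then true else w.contains 't')
          = (w ++ [c]).contains 't' := by
        by_cases hct : c = 't' <;> by_cases hw : 't' ∈ w <;>
          simp [List.contains_append, hct, hw, eq_comm, List.contains_iff_mem]
      have h2 : (if ((w ++ [c]).contains 't') = true ∧ c = 'b' then true else pvHasTB w)
          = pvHasTB (w ++ [c]) := by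
        rw [pvHasTB_append]
        by_cases hb : c = 'b' <;> by_cases hw : 't' ∈ w <;>
          simp [List.contains_append, hb, hw, eq_comm, List.contains_iff_mem,
            Bool.beq_eq_decide_eq]
      have hstep : pvStepA (w.contains 't', pvHasTB w, (w.length : Int), pal) c
          = ((w ++ [c]).contains 't', pvHasTB (w ++ [c]), ((w ++ [c]).length : Int), pal) := by
        simp only [pvStepA]
        rw [if_neg (by tauto)]
        rw [h1, h2]
        simp [List.length_append]
      rw [List.foldl_cons, hstep, ih (w ++ [c]) pal]
      rw [show pvSplit w (c :: rest) = pvSplit (w ++ [c]) rest from by simp [pvSplit, hc.1, hc.2]]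

theorem pvAlt_eq (cadena : String) :
    analisis_cadena_alt cadena
      = ((pvSplit [] cadena.toList).dropLast).foldl
          (fun p u => if 4 < u.length ∧ pvHasTB u = true then p + 1 else p) 0 := by
  have hrep : PySem.Str.replace cadena "." " " = String.ofList (cadena.toList.map pvSub) := by
    simp only [PySem.Str.replace]
    rw [show (".".toList : List Char) = ['.'] from rfl, show (" ".toList : List Char) = [' '] from rfl]
    rw [pvReplaceEq]
  have hsplit : PySem.Chars.splitOn (cadena.toList.map pvSub) [' '] = pvSplit [] cadena.toList := by
    unfold PySem.Chars.splitOn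
    rw [pvSplitGo _ _ [] [] (by omega)]
    simp [pvSplit1_map]
  unfold analisis_cadena_alt
  rw [hrep]
  simp only [PySem.Str.split?, PySem.Chars.split?, String.toList_ofList]
  rw [if_neg (by simp), show (" ".toList : List Char) = [' '] from rfl, hsplit]
  simp only [Option.map_some, Option.getD_some, PySem.List.slice_to_neg_one, ← List.map_dropLast,
    List.foldl_map]
  have hfun : ∀ (pal : Int) (u : List Char),
      (if 4 < PySem.Str.len (String.ofList u) ∧ PySem.Str.find (String.ofList u) "t" ≠ -1 ∧
          PySem.Str.isIn "b" (PySem.Str.slice (String.ofList u)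
            (some (PySem.Str.find (String.ofList u) "t" + 1)) none) = true
        then pal + 1 else pal)
      = (if 4 < u.length ∧ pvHasTB u = true then pal + 1 else pal) := by
    intro pal u
    have : (4 < PySem.Str.len (String.ofList u) ∧ PySem.Str.find (String.ofList u) "t" ≠ -1 ∧
        PySem.Str.isIn "b" (PySem.Str.slice (String.ofList u)
          (some (PySem.Str.find (String.ofList u) "t" + 1)) none) = true)
        ↔ (4 < u.length ∧ pvHasTB u = true) := by
      rw [show PySem.Str.len (String.ofList u) = (u.length : Int) from by
            simp [PySem.Str.len]]
      rw [show PySem.Str.find (String.ofList u) "t" = PySem.Chars.find u ['t'] from by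
            simp [PySem.Str.find]]
      rw [show ∀ b?, PySem.Str.isIn "b" (PySem.Str.slice (String.ofList u) b? none)
            = PySem.Chars.isIn ['b'] (PySem.List.slice u b? none) from by
            intro b?; simp [PySem.Str.isIn, PySem.Str.slice]]
      exact pvGood u
    exact if_congr this rfl rfl
  simp only [hfun]

-- ===== VERDICT (by name: the statement is the Claim_ definition above) =====
theorem analisis_cadena_spec : Claim_equal_analisis_cadena := by
  intro cadena _
  unfold Spec_analisis_cadena
  have hA : analisis_cadena cadena = (cadena.toList.foldl pvStepA (false, false, 0, 0)).2.2.2 := rfl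
  rw [hA, pvAlt_eq]
  have h := pvMain cadena.toList [] 0
  simpa [pvHasTB] using h
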